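-- pv_equiv track=rewrite | github.com/denisenkoi/gpu_ag | cpu_baseline/ag_rewards/ag_func_self_correlation.py | group_values
-- ===== SOURCE A (Python) =====
-- def group_values(values, threshold):
--     grouped = []
--     temp_group = []
--     first_group_idx = 0
--
--     for value in sorted(values):
--         if not temp_group or value - temp_group[0] <= threshold:
--             temp_group.append(value)
--         else:
--             grouped.append(temp_group)
--             temp_group = [value]
--
--     if temp_group:
--         grouped.append(temp_group)
--
--     return grouped
-- ===== SOURCE B (Python) =====
-- def group_values(values, threshold):
--     s = sorted(values)
--     n = len(s)
--     groups = []
--     i = 0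
--     while i < n:
--         # find end of group by binary search: first index > i with s[index] > s[i] + threshold
--         limit = s[i] + threshold
--         lo, hi = i + 1, n
--         while lo < hi:
--             mid = (lo + hi) // 2
--             if s[mid] <= limit:
--                 lo = mid + 1
--             else:
--                 hi = mid
--         groups.append(s[i:lo])
--         i = lo
--     return groups
-- ===== Notes on version B (the rewrite author's own statement) =====
-- stated objective: alternative
-- what changed: B sorts once and then finds each group's end by BINARY SEARCH for the first element exceeding start+threshold (valid because the sorted list makes each group a contiguous prefix of the remainder), emitting the group as a slice, instead of A's single linear pass that accumulates a temp_group element by element.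
import Mathlib
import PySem

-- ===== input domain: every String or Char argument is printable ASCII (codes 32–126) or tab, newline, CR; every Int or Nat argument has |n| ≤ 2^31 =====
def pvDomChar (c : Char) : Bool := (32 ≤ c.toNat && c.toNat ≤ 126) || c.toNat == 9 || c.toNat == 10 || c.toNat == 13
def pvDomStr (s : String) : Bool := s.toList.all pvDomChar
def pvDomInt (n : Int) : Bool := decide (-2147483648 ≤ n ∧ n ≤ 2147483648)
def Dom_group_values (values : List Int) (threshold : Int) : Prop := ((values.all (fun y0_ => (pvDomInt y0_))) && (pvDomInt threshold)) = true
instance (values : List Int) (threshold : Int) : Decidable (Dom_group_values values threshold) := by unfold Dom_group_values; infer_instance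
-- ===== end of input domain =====

-- B finds each group's end by binary search for the first sorted element exceeding start+threshold
-- (correct because a group is a contiguous prefix of the sorted remainder), instead of A's linear
-- accumulating pass. Alternative decomposition, same overall cost (the sort dominates).

-- ===== PORT A =====
-- the for-loop: state is (grouped, temp_group); branches in A's order (the 'not temp_group or …'
-- short-circuit becomes a match on temp_group)
def gvLoopA (t : Int) : List Int → List (List Int) → List Int → List (List Int) × List Int
  | [], g, temp => (g, temp)
  | v :: rest, g, temp =>
    match temp with
    | [] => gvLoopA t rest g (temp ++ [v])
    | h :: _ => if v - h ≤ t then gvLoopA t rest g (temp ++ [v])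
                else gvLoopA t rest (g ++ [temp]) [v]

-- the trailing 'if temp_group: grouped.append(temp_group)' of A
def gvFinish (r : List (List Int) × List Int) : List (List Int) :=
  if r.2 = [] then r.1 else r.1 ++ [r.2]

def group_values (values : List Int) (threshold : Int) : List (List Int) :=
  gvFinish (gvLoopA threshold (PySem.List.sorted values (fun x => x) false) [] [])

-- ===== PORT B =====
-- inner while: binary search in [lo, hi) for the first index whose element exceeds limit.
-- In every call made by gvOutB, mid < hi ≤ s.length, so getD's default 0 is never read
-- (it only makes the Python s[mid] total in Lean).
-- termination facts for the binary search (named so the proof terms are not inlined into the definition)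
theorem gvBS_dec1 (lo hi : Nat) (h : lo < hi) : hi - ((lo + hi) / 2 + 1) < hi - lo := by omega
theorem gvBS_dec2 (lo hi : Nat) (h : lo < hi) : (lo + hi) / 2 - lo < hi - lo := by omega

def gvBS (s : List Int) (limit : Int) (lo hi : Nat) : Nat :=
  if lo < hi then
    -- mid = (lo + hi) // 2, written inline
    if s.getD ((lo + hi) / 2) 0 ≤ limit then gvBS s limit ((lo + hi) / 2 + 1) hi
    else gvBS s limit lo ((lo + hi) / 2)
  else lo
termination_by hi - lo
decreasing_by
  · exact gvBS_dec1 lo hi (by assumption)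
  · exact gvBS_dec2 lo hi (by assumption)

theorem gvBS_ge (s : List Int) (limit : Int) (lo hi : Nat) : lo ≤ gvBS s limit lo hi := by
  unfold gvBS
  split
  · split
    · have := gvBS_ge s limit ((lo + hi) / 2 + 1) hi
      omega
    · exact gvBS_ge s limit lo ((lo + hi) / 2)
  · exact Nat.le_refl lo
termination_by hi - lo
decreasing_by
  · exact gvBS_dec2 lo hi (by assumption)
  · exact gvBS_dec1 lo hi (by assumption)

theorem gvOutB_dec (s : List Int) (t : Int) (i : Nat) (h : i < s.length) :
    s.length - gvBS s (s[i] + t) (i + 1) s.length < s.length - i := by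
  have := gvBS_ge s (s[i] + t) (i + 1) s.length
  omega

-- outer while over i; the Python slice s[i:j] (0 ≤ i ≤ j) is exactly (s.drop i).take (j - i)
def gvOutB (s : List Int) (t : Int) (i : Nat) : List (List Int) :=
  if h : i < s.length then
    -- j = end of the group found by binary search; Python slice s[i:j] = (s.drop i).take (j - i)
    ((s.drop i).take (gvBS s (s[i] + t) (i + 1) s.length - i))
      :: gvOutB s t (gvBS s (s[i] + t) (i + 1) s.length)
  else []
termination_by s.length - i
decreasing_by exact gvOutB_dec s t i (by assumption)

def group_values_alt (values : List Int) (threshold : Int) : List (List Int) :=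
  gvOutB (PySem.List.sorted values (fun x => x) false) threshold 0

-- ===== PRECONDITION & SPEC =====
def Spec_group_values (values : List Int) (threshold : Int) (out : List (List Int)) : Prop := out = group_values_alt values threshold
instance (values : List Int) (threshold : Int) (out : List (List Int)) : Decidable (Spec_group_values values threshold out) := by unfold Spec_group_values; infer_instance

-- ===== CLAIM (what is proved, stated in full; the proofs are below) =====
def Claim_equal_group_values : Prop := ∀ (values : List Int) (threshold : Int), Dom_group_values values threshold → Spec_group_values values threshold (group_values values threshold)

-- ===== LEMMAS AND PROOFS =====

-- the group-membership predicate, named so simp does not rewrite under the lambda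
def gvP (base t : Int) (y : Int) : Bool := decide (y - base ≤ t)

theorem gvRec_dec (t x : Int) (xs : List Int) :
    (xs.dropWhile (gvP x t)).length < (x :: xs).length := by
  have := List.length_dropWhile_le (p := gvP x t) xs
  simp only [List.length_cons]
  omega

-- common reference form: head starts each group, rest taken while within threshold of the head
def gvRec (t : Int) : List Int → List (List Int)
  | [] => []
  | x :: xs => (x :: xs.takeWhile (gvP x t)) :: gvRec t (xs.dropWhile (gvP x t))
termination_by l => l.length
decreasing_by exact gvRec_dec t x xs

theorem gvRec_nil (t : Int) : gvRec t [] = [] := by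
  rw [gvRec.eq_def]

theorem gvRec_cons (t x : Int) (xs : List Int) :
    gvRec t (x :: xs) = (x :: xs.takeWhile (gvP x t)) :: gvRec t (xs.dropWhile (gvP x t)) := by
  rw [gvRec.eq_def]

theorem gv_take_takeWhile {α : Type} (p : α → Bool) (l : List α) :
    l.take (l.takeWhile p).length = l.takeWhile p := by
  induction l with
  | nil => rfl
  | cons a l ih =>
    by_cases h : p a = true
    · simp [h, ih]
    · simp [h]

theorem gv_drop_takeWhile {α : Type} (p : α → Bool) (l : List α) :
    l.drop (l.takeWhile p).length = l.dropWhile p := by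
  induction l with
  | nil => rfl
  | cons a l ih =>
    by_cases h : p a = true
    · simp [h, ih]
    · simp [h]

-- in a takeWhile prefix every element satisfies p; the first element after it does not
theorem gv_takeWhile_getElem {α : Type} (p : α → Bool) (l : List α) (r : Nat)
    (hr : r < (l.takeWhile p).length) (hl : r < l.length) : p l[r] = true := by
  induction l generalizing r with
  | nil => simp at hl
  | cons a l ih =>
    by_cases h : p a = true
    · cases r with
      | zero => simpa using h
      | succ r =>
        simp only [List.takeWhile_cons, h, if_true, List.length_cons] at hr
        simpa using ih r (by omega) (by simpa using hl)
    · simp [h] at hr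

theorem gv_takeWhile_boundary {α : Type} (p : α → Bool) (l : List α)
    (h : (l.takeWhile p).length < l.length) :
    p (l[(l.takeWhile p).length]'h) = false := by
  induction l with
  | nil => simp at h
  | cons a l ih =>
    by_cases hp : p a = true
    · simp only [List.takeWhile_cons, hp, if_true, List.length_cons] at h ⊢
      simpa using ih (by omega)
    · simp [hp]

-- characterisation of the group boundary on a sorted list:
-- for m ≥ lo, s[m] ≤ limit iff m < lo + (takeWhile prefix length of s.drop lo)
theorem gv_boundary_char (s : List Int) (limit : Int)
    (hs : s.Pairwise (· ≤ ·)) (lo m : Nat) (hlom : lo ≤ m) (hm : m < s.length) :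
    (s[m] ≤ limit ↔ m < lo + ((s.drop lo).takeWhile (fun y => decide (y ≤ limit))).length) := by
  set p : Int → Bool := fun y => decide (y ≤ limit) with hp
  set tl := s.drop lo with htl
  set L := (tl.takeWhile p).length with hLdef
  have hL : L ≤ tl.length := (List.takeWhile_sublist p).length_le
  have hlen : tl.length = s.length - lo := by simp [htl]
  have hrl : m - lo < tl.length := by omega
  have hget : s[m] = tl[m - lo]'hrl := by
    simp only [htl, List.getElem_drop]
    congr 1
    omega
  have hstl : tl.Pairwise (· ≤ ·) := hs.sublist (htl ▸ List.drop_sublist lo s)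
  constructor
  · intro hle
    by_contra hge
    have hLlt : L < tl.length := by omega
    have hb : p (tl[L]'hLlt) = false := gv_takeWhile_boundary p tl hLlt
    have hmono : tl[L]'hLlt ≤ tl[m - lo]'hrl := by
      rcases Nat.lt_or_ge L (m - lo) with hlt | hge2
      · exact (List.pairwise_iff_getElem.mp hstl) L (m - lo) hLlt hrl hlt
      · have heq : L = m - lo := by omega
        simp only [heq]
        exact le_refl _
    rw [hget] at hle
    have : p (tl[L]'hLlt) = true := by
      simp only [hp, decide_eq_true_eq]
      exact le_trans hmono hle
    rw [hb] at this
    exact Bool.false_ne_true this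
  · intro hlt
    have : p (tl[m - lo]'hrl) = true := gv_takeWhile_getElem p tl (m - lo) (by omega) hrl
    rw [hget]
    simpa [hp] using this

-- binary search finds k0 when lo ≤ k0 ≤ hi ≤ n and base ≤ lo, where k0 is the
-- boundary characterised (for indices ≥ base) by hch
theorem gvBS_find (s : List Int) (limit : Int) (base k0 lo hi : Nat)
    (hb : base ≤ lo) (h1 : lo ≤ k0) (h2 : k0 ≤ hi) (h3 : hi ≤ s.length)
    (hch : ∀ m, base ≤ m → (hm : m < s.length) → (s[m] ≤ limit ↔ m < k0)) :
    gvBS s limit lo hi = k0 := by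
  unfold gvBS
  split
  · rename_i hlh
    have hmidlt : (lo + hi) / 2 < s.length := by omega
    have hget : s.getD ((lo + hi) / 2) 0 = s[(lo + hi) / 2] := by
      simp [List.getD_eq_getElem?_getD, List.getElem?_eq_getElem hmidlt]
    rw [hget]
    split
    · rename_i hle
      have := (hch ((lo + hi) / 2) (by omega) hmidlt).mp hle
      exact gvBS_find s limit base k0 ((lo + hi) / 2 + 1) hi (by omega) (by omega) h2 h3 hch
    · rename_i hgt
      have hk : ¬ ((lo + hi) / 2 < k0) := fun h =>
        hgt ((hch ((lo + hi) / 2) (by omega) hmidlt).mpr h)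
      exact gvBS_find s limit base k0 lo ((lo + hi) / 2) hb h1 (by omega) (by omega) hch
  · omega
termination_by hi - lo
decreasing_by all_goals omega

-- the two predicates coincide
theorem gvP_eq (base t : Int) : gvP base t = fun y => decide (y ≤ base + t) := by
  funext y
  simp only [gvP, decide_eq_decide]
  omega

-- B's outer loop equals the reference recursion on a sorted list
theorem gvOutB_eq (s : List Int) (t : Int) (hs : s.Pairwise (· ≤ ·)) (i : Nat) :
    gvOutB s t i = gvRec t (s.drop i) := by
  unfold gvOutB
  split
  · rename_i h
    have hdrop : s.drop i = s[i] :: s.drop (i + 1) := List.drop_eq_getElem_cons h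
    set p : Int → Bool := fun y => decide (y ≤ s[i] + t) with hp
    set L := ((s.drop (i + 1)).takeWhile p).length with hL
    have hLle : L ≤ (s.drop (i + 1)).length := (List.takeWhile_sublist p).length_le
    have hlen : (s.drop (i + 1)).length = s.length - (i + 1) := by simp
    have hbs : gvBS s (s[i] + t) (i + 1) s.length = (i + 1) + L :=
      gvBS_find s (s[i] + t) (i + 1) ((i + 1) + L) (i + 1) s.length (le_refl _)
        (by omega) (by omega) (le_refl _)
        (fun m hm hmlt => gv_boundary_char s (s[i] + t) hs (i + 1) m hm hmlt)
    rw [hbs, gvOutB_eq s t hs ((i + 1) + L)]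
    have h1 : (i + 1) + L - i = L + 1 := by omega
    have h2 : s.drop ((i + 1) + L) = (s.drop (i + 1)).drop L := by
      rw [List.drop_drop]
    rw [h1, h2, hdrop, List.take_succ_cons, gvRec_cons, gvP_eq, ← hp, hL,
      gv_take_takeWhile, gv_drop_takeWhile]
  · rename_i h
    rw [List.drop_eq_nil_of_le (by omega), gvRec_nil]
termination_by s.length - i
decreasing_by
  have := gvBS_ge s (s[i] + t) (i + 1) s.length
  omega

-- A's loop + finish equals the reference recursion (any list, relative to the running head)
theorem gvLoopA_eq (t : Int) (l : List Int) (g : List (List Int)) (h : Int) (temp : List Int) :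
    gvFinish (gvLoopA t l g (h :: temp)) =
      g ++ ((h :: temp) ++ l.takeWhile (gvP h t)) :: gvRec t (l.dropWhile (gvP h t)) := by
  induction l generalizing g h temp with
  | nil => simp [gvLoopA, gvFinish, gvRec_nil]
  | cons v rest ih =>
    by_cases hb : v - h ≤ t
    · have hd : gvP h t v = true := by simp [gvP, hb]
      simp only [gvLoopA, if_pos hb, List.cons_append]
      rw [ih g h (temp ++ [v])]
      simp [hd]
    · have hd : gvP h t v = false := by simp [gvP, hb]
      simp only [gvLoopA, if_neg hb]
      rw [ih (g ++ [h :: temp]) v []]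
      simp [hd, gvRec_cons]

-- ===== VERDICT (by name: the statement is the Claim_ definition above) =====
theorem group_values_spec : Claim_equal_group_values := by
  intro values threshold _
  unfold Spec_group_values group_values group_values_alt
  have hs : (PySem.List.sorted values (fun x => x) false).Pairwise (· ≤ ·) := by
    simpa using PySem.List.sorted_pairwise (xs := values) (key := fun x => x)
  rw [gvOutB_eq _ _ hs]
  simp only [List.drop_zero]
  cases hsv : PySem.List.sorted values (fun x => x) false with
  | nil => simp [gvLoopA, gvFinish, gvRec_nil]
  | cons x xs =>
    have h := gvLoopA_eq threshold xs [] x []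
    rw [gvRec_cons]
    simp only [gvLoopA]
    simpa using h
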